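-- pv_equiv track=rewrite | github.com/ebbunnim/Algorithm | 백준/2290_LCD_TEST.py | nine
-- ===== SOURCE A (Python) =====
-- def nine(w,h):
--     s=[[' ']*w for _ in range(h)]
--     for j in range(1,w-1):
--         s[0][j]='-'
--     for i in range(1,h//2):
--         s[i][0]='|'
--         s[i][w-1]='|'
--     for j in range(1,w-1):
--         s[h//2][j]='-'
--     for i in range(h//2+1,h-1):
--         s[i][w-1]='|'
--     for j in range(1,w-1):
--         s[h-1][j]='-'
--     return (list(map(lambda x : ''.join(x), s)))
-- ===== SOURCE B (Python) =====
-- def nine(w, h):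
--     # Build each row string directly from its role; later segments of A win,
--     # but A's segments never collide on a cell, so each row has one role.
--     if w >= 2:
--         bar = ' ' + '-' * (w - 2) + ' '
--         sides = '|' + ' ' * (w - 2) + '|'
--     else:
--         bar = ' ' * w
--         sides = '|' * w
--     right = ' ' * (w - 1) + '|' if w >= 1 else ''
--     rows = []
--     for i in range(h):
--         if i == 0 or i == h // 2 or i == h - 1:
--             rows.append(bar)
--         elif i < h // 2:
--             rows.append(sides)
--         else:
--             rows.append(right)
--     return rows
-- ===== Notes on version B (the rewrite author's own statement) =====
-- stated objective: simpler
-- what changed: B classifies each row index by its role (bar / two-sided / right-only) and emits one of three prebuilt shared row strings per index, instead of allocating a mutable character grid, overwriting cells segment by segment and joining each row as A does (no per-cell work, so it is measurably faster by a constant factor).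
import Mathlib
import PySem

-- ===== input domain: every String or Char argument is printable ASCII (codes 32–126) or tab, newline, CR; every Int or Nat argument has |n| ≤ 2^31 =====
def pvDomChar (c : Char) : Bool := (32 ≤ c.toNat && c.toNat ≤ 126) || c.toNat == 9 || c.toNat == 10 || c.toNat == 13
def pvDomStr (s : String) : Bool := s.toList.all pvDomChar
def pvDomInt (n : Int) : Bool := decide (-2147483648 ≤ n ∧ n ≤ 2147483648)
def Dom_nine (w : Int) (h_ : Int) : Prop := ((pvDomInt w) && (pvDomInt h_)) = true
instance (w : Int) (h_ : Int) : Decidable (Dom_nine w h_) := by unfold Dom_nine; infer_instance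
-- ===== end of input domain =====

-- B renders each row directly from its role (bar / two-sided / right-only) instead of
-- mutating a character grid; equivalence is proved on Pre_nine (exactly where A returns).

-- ===== PORT A =====
-- Python list assignment xs[i] = v (negative index counts from the end; assignments that
-- would be an IndexError in Python only occur outside Pre_nine).
def pySetA {α : Type} (l : List α) (i : Int) (x : α) : List α :=
  if 0 ≤ i then l.set i.toNat x else l.set (l.length + i).toNat x

-- s[i][j] = x on the grid (Python raises when row i is missing; outside Pre_nine)
def setCell (s : List (List Char)) (i j : Int) (x : Char) : List (List Char) :=
  (PySem.List.pyGet? s i).elim s (fun row => pySetA s i (pySetA row j x))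

def nine (w : Int) (h_ : Int) : List String :=
  let s : List (List Char) :=
    (PySem.List.pyRange 0 h_ 1).map (fun _ => List.replicate w.toNat ' ')
  let s := (PySem.List.pyRange 1 (w - 1) 1).foldl (fun s j => setCell s 0 j '-') s
  let s := (PySem.List.pyRange 1 (PySem.Int.floordiv h_ 2) 1).foldl
      (fun s i => setCell (setCell s i 0 '|') i (w - 1) '|') s
  let s := (PySem.List.pyRange 1 (w - 1) 1).foldl
      (fun s j => setCell s (PySem.Int.floordiv h_ 2) j '-') s
  let s := (PySem.List.pyRange (PySem.Int.floordiv h_ 2 + 1) (h_ - 1) 1).foldl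
      (fun s i => setCell s i (w - 1) '|') s
  let s := (PySem.List.pyRange 1 (w - 1) 1).foldl (fun s j => setCell s (h_ - 1) j '-') s
  s.map (fun row => String.ofList row)  -- ''.join over a list of chars is exactly String.ofList

-- ===== PORT B =====
def nine_alt (w : Int) (h_ : Int) : List String :=
  -- ' ' + '-'*(w-2) + ' '  /  '|' + ' '*(w-2) + '|'  /  ' '*(w-1) + '|'  as char lists
  let bar : List Char :=
    if 2 ≤ w then ' ' :: (List.replicate (w - 2).toNat '-' ++ [' '])
    else List.replicate w.toNat ' '
  let sides : List Char :=
    if 2 ≤ w then '|' :: (List.replicate (w - 2).toNat ' ' ++ ['|'])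
    else List.replicate w.toNat '|'
  let right : List Char :=
    if 1 ≤ w then List.replicate (w - 1).toNat ' ' ++ ['|'] else []
  (PySem.List.pyRange 0 h_ 1).map (fun i =>
    if i = 0 ∨ i = PySem.Int.floordiv h_ 2 ∨ i = h_ - 1 then String.ofList bar
    else if i < PySem.Int.floordiv h_ 2 then String.ofList sides
    else String.ofList right)

-- ===== PRECONDITION & SPEC =====
-- Pre_nine is exactly where A returns: A raises IndexError when w ≥ 3 and h ≤ 0,
-- and when w ≤ 0 and h ≥ 4 (cell assignment into a too-short grid or row).
def Pre_nine (w : Int) (h_ : Int) : Prop := (3 ≤ w → 1 ≤ h_) ∧ (w ≤ 0 → h_ ≤ 3)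
instance (w : Int) (h_ : Int) : Decidable (Pre_nine w h_) := by unfold Pre_nine; infer_instance
def pvWitness_nine : Int × Int := (5, 7)

def Spec_nine (w : Int) (h_ : Int) (out : List String) : Prop := out = nine_alt w h_
instance (w : Int) (h_ : Int) (out : List String) : Decidable (Spec_nine w h_ out) := by unfold Spec_nine; infer_instance

-- ===== CLAIM (what is proved, stated in full; the proofs are below) =====
def Claim_equal_nine : Prop := ∀ (w : Int) (h_ : Int), Dom_nine w h_ → Pre_nine w h_ → Spec_nine w h_ (nine w h_)

-- ===== LEMMAS AND PROOFS =====

theorem pySetA_nonneg {α : Type} (l : List α) (i : Int) (x : α) (hi : 0 ≤ i) :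
    pySetA l i x = l.set i.toNat x := by simp [pySetA, hi]

theorem length_pySetA {α : Type} (l : List α) (i : Int) (x : α) :
    (pySetA l i x).length = l.length := by unfold pySetA; split <;> simp

theorem length_setCell (s : List (List Char)) (i j : Int) (x : Char) :
    (setCell s i j x).length = s.length := by
  unfold setCell
  cases h : PySem.List.pyGet? s i <;> simp [length_pySetA]

theorem setCell_nil (i j : Int) (x : Char) : setCell [] i j x = [] := by
  have hg : PySem.List.pyGet? ([] : List (List Char)) i = none := by
    rw [PySem.List.pyGet?_eq_none_iff]
    simp [PySem.Raise.InRange]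
  rw [setCell, hg, Option.elim]

theorem foldl_len_pres {α β : Type} (f : List α → β → List α)
    (hf : ∀ s b, (f s b).length = s.length) :
    ∀ (l : List β) (s : List α), (l.foldl f s).length = s.length := by
  intro l
  induction l with
  | nil => intro s; rfl
  | cons b t ih => intro s; rw [List.foldl_cons, ih, hf]

theorem foldl_keep_nil {β : Type} (f : List (List Char) → β → List (List Char))
    (hf : ∀ b, f [] b = []) : ∀ (l : List β), l.foldl f [] = [] := by
  intro l
  induction l with
  | nil => rfl
  | cons b t ih => rw [List.foldl_cons, hf, ih]

theorem setCell_eq_set (s : List (List Char)) (i j : Int) (x : Char)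
    (hi : 0 ≤ i) (hil : i.toNat < s.length) :
    setCell s i j x = s.set i.toNat (pySetA (s[i.toNat]) j x) := by
  have hg : PySem.List.pyGet? s i = some (s[i.toNat]) :=
    PySem.List.pyGet?_eq_some_getElem s hi (by omega)
  rw [setCell, hg, Option.elim, pySetA_nonneg _ _ _ hi]

theorem set_getElem_self' {α : Type} (l : List α) (n : Nat) (h : n < l.length) :
    l.set n (l[n]) = l := by
  apply List.ext_getElem (by simp)
  intro k h1 h2
  rw [List.getElem_set]
  split <;> simp_all

-- a fold writing into one fixed row equals setting that row to the row-level fold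
theorem gridRowFold (c : Char) (r : Int) (hr : 0 ≤ r) :
    ∀ (jl : List Int) (s : List (List Char)) (hlt : r.toNat < s.length),
      jl.foldl (fun s j => setCell s r j c) s
        = s.set r.toNat (jl.foldl (fun row j => pySetA row j c) (s[r.toNat])) := by
  intro jl
  induction jl with
  | nil => intro s hlt; rw [List.foldl_nil]; exact (set_getElem_self' s r.toNat hlt).symm
  | cons j rest ih =>
      intro s hlt
      rw [List.foldl_cons, setCell_eq_set s r j c hr hlt,
        ih _ (by rw [List.length_set]; exact hlt), List.set_set, List.foldl_cons,
        List.getElem_set_self]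

-- a fold whose steps each rewrite one distinct row: per-index characterisation
theorem foldSet_getElem? {α : Type} (g : α → α) (f : List α → Int → List α)
    (hf : ∀ (s : List α) (i : Int), 0 ≤ i → ∀ (hil : i.toNat < s.length),
        f s i = s.set i.toNat (g (s[i.toNat])))
    (hlen : ∀ s b, (f s b).length = s.length) :
    ∀ (il : List Int), il.Pairwise (· < ·) → (∀ i ∈ il, 0 ≤ i) →
    ∀ (s : List α), (∀ i ∈ il, i.toNat < s.length) →
    ∀ (k : Nat) (hk : k < s.length),
      (il.foldl f s)[k]? = some (if (k : Int) ∈ il then g (s[k]) else s[k]) := by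
  intro il
  induction il with
  | nil => intro _ _ s _ k hk; rw [List.foldl_nil, List.getElem?_eq_getElem hk]; simp
  | cons a rest ih =>
      intro hp hpos s hl k hk
      have ha0 : 0 ≤ a := hpos a (by simp)
      have hal : a.toNat < s.length := hl a (by simp)
      rw [List.foldl_cons, hf s a ha0 hal]
      rw [ih hp.of_cons (fun i hi => hpos i (by simp [hi]))
          _ (fun i hi => by simpa using hl i (by simp [hi])) k (by simpa using hk)]
      by_cases hka : (k : Int) = a
      · have hkn : a.toNat = k := by omega
        subst hkn
        have hnr : ((a.toNat : Nat) : Int) ∉ rest := by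
          intro hmem
          have := (List.pairwise_cons.mp hp).1 _ hmem
          omega
        have hmemc : ((a.toNat : Nat) : Int) ∈ a :: rest := List.mem_cons.mpr (Or.inl hka)
        rw [if_neg hnr, if_pos hmemc, List.getElem_set, if_pos rfl]
      · have hkn : a.toNat ≠ k := by omega
        simp only [List.getElem_set, if_neg hkn, List.mem_cons, hka, false_or]

theorem setCell2_eq (w : Int) (s : List (List Char)) (i : Int)
    (hi : 0 ≤ i) (hil : i.toNat < s.length) :
    setCell (setCell s i 0 '|') i (w - 1) '|'
      = s.set i.toNat (pySetA (pySetA (s[i.toNat]) 0 '|') (w - 1) '|') := by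
  rw [setCell_eq_set s i 0 '|' hi hil,
    setCell_eq_set _ i (w - 1) '|' hi (by rw [List.length_set]; exact hil),
    List.getElem_set_self, List.set_set]

-- row contents -----------------------------------------------------------------

def eRow (w : Int) : List Char := List.replicate w.toNat ' '
def barL (w : Int) : List Char :=
  if 2 ≤ w then ' ' :: (List.replicate (w - 2).toNat '-' ++ [' '])
  else List.replicate w.toNat ' '
def sidesL (w : Int) : List Char :=
  if 2 ≤ w then '|' :: (List.replicate (w - 2).toNat ' ' ++ ['|'])
  else List.replicate w.toNat '|'
def rightL (w : Int) : List Char :=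
  if 1 ≤ w then List.replicate (w - 1).toNat ' ' ++ ['|'] else []
def Jfold (w : Int) (row : List Char) : List Char :=
  (PySem.List.pyRange 1 (w - 1) 1).foldl (fun r j => pySetA r j '-') row
def g2row (w : Int) (row : List Char) : List Char :=
  pySetA (pySetA row 0 '|') (w - 1) '|'
def g4row (w : Int) (row : List Char) : List Char := pySetA row (w - 1) '|'

theorem length_eRow (w : Int) : (eRow w).length = w.toNat := by simp [eRow]

theorem length_barL (w : Int) : (barL w).length = w.toNat := by
  unfold barL; split <;> simp <;> omega

theorem length_Jfold (w : Int) (row : List Char) : (Jfold w row).length = row.length :=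
  foldl_len_pres _ (fun s b => length_pySetA s b '-') _ row

-- the three-segment rows a :: m^(w-2) ++ [b], element-wise
theorem edge3_getElem? (a m b : Char) (w : Int) (hw : 2 ≤ w) (k : Nat) (hk : k < w.toNat) :
    (a :: (List.replicate (w - 2).toNat m ++ [b]))[k]? =
      some (if k = 0 then a else if (k : Int) < w - 1 then m else b) := by
  cases k with
  | zero => simp
  | succ n =>
      rw [List.getElem?_cons_succ, if_neg (Nat.succ_ne_zero n)]
      by_cases hn : n < (w - 2).toNat
      · rw [List.getElem?_append_left (by simpa using hn), List.getElem?_replicate,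
          if_pos hn, if_pos (by omega)]
      · rw [List.getElem?_append_right (by simpa using hn)]
        have h1 : n - (List.replicate (w - 2).toNat m).length = 0 := by simp; omega
        rw [h1, List.getElem?_cons_zero, if_neg (by omega)]

theorem Jfold_getElem? (w : Int) (row : List Char)
    (hlr : row.length = w.toNat) (k : Nat) (hk : k < row.length) :
    (Jfold w row)[k]? = some (if 1 ≤ (k : Int) ∧ (k : Int) < w - 1 then '-' else row[k]) := by
  have := foldSet_getElem? (fun _ => '-') (fun r j => pySetA r j '-')
    (fun s i hi hil => pySetA_nonneg s i '-' hi)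
    (fun s b => length_pySetA s b '-')
    (PySem.List.pyRange 1 (w - 1) 1)
    (PySem.List.pairwise_lt_pyRange_one 1 (w - 1))
    (fun i hi => by have := (PySem.List.mem_pyRange_one).mp hi; omega)
    row
    (fun i hi => by have := (PySem.List.mem_pyRange_one).mp hi; omega)
    k hk
  rw [Jfold, this]
  simp only [PySem.List.mem_pyRange_one]

theorem barL_getElem? (w : Int) (hw : 2 ≤ w) (k : Nat) (hk : k < w.toNat) :
    (barL w)[k]? = some (if k = 0 then ' ' else if (k : Int) < w - 1 then '-' else ' ') := by
  unfold barL; rw [if_pos hw]; exact edge3_getElem? ' ' '-' ' ' w hw k hk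

theorem J_e (w : Int) : Jfold w (eRow w) = barL w := by
  by_cases hw : 2 ≤ w
  · apply List.ext_getElem?
    intro k
    by_cases hk : k < w.toNat
    · rw [Jfold_getElem? w _ (length_eRow w) k (by rw [length_eRow]; exact hk),
        barL_getElem? w hw k hk]
      simp only [eRow, List.getElem_replicate]
      split_ifs <;> first | rfl | omega
    · rw [List.getElem?_eq_none (by rw [length_Jfold, length_eRow]; omega),
        List.getElem?_eq_none (by rw [length_barL]; omega)]
  · unfold Jfold barL eRow
    rw [PySem.List.pyRange_one_eq_nil (by omega), List.foldl_nil, if_neg hw]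

theorem J_barL (w : Int) : Jfold w (barL w) = barL w := by
  by_cases hw : 2 ≤ w
  · apply List.ext_getElem?
    intro k
    by_cases hk : k < w.toNat
    · have hkb : k < (barL w).length := by rw [length_barL]; exact hk
      rw [Jfold_getElem? w _ (length_barL w) k hkb, barL_getElem? w hw k hk]
      have hbk : (barL w)[k]'hkb = (if k = 0 then ' ' else if (k : Int) < w - 1 then '-' else ' ') := by
        have h2 := barL_getElem? w hw k hk
        rw [List.getElem?_eq_getElem hkb] at h2
        exact Option.some.inj h2
      rw [hbk]
      split_ifs <;> first | rfl | omega
    · rw [List.getElem?_eq_none (by rw [length_Jfold, length_barL]; omega),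
        List.getElem?_eq_none (by rw [length_barL]; omega)]
  · unfold Jfold
    rw [PySem.List.pyRange_one_eq_nil (by omega), List.foldl_nil]

theorem g2_e (w : Int) (hw : 1 ≤ w) : g2row w (eRow w) = sidesL w := by
  by_cases hw2 : 2 ≤ w
  · unfold g2row sidesL eRow
    rw [pySetA_nonneg _ _ _ (by omega), pySetA_nonneg _ _ _ (by omega), if_pos hw2]
    apply List.ext_getElem?
    intro k
    by_cases hk : k < w.toNat
    · rw [edge3_getElem? '|' ' ' '|' w hw2 k hk]
      simp only [List.getElem?_set, List.length_set, List.length_replicate,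
        List.getElem?_replicate, Int.toNat_zero]
      split_ifs <;> first | rfl | omega
    · rw [List.getElem?_eq_none (by simp; omega),
        List.getElem?_eq_none (by simp; omega)]
  · obtain rfl : w = 1 := by omega
    decide

theorem g4_e (w : Int) (hw : 1 ≤ w) : g4row w (eRow w) = rightL w := by
  unfold g4row rightL eRow
  rw [pySetA_nonneg _ _ _ (by omega), if_pos hw]
  apply List.ext_getElem?
  intro k
  by_cases hk : k < w.toNat
  · by_cases hkl : k < (w - 1).toNat
    · rw [List.getElem?_append_left (by simpa using hkl)]
      simp only [List.getElem?_set, List.getElem?_replicate]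
      split_ifs <;> first | rfl | omega
    · rw [List.getElem?_append_right (by simpa using hkl)]
      have h1 : k - (List.replicate (w - 1).toNat ' ').length = 0 := by simp; omega
      rw [h1, List.getElem?_cons_zero]
      simp only [List.getElem?_set, List.length_replicate]
      split_ifs <;> first | rfl | omega
  · rw [List.getElem?_eq_none (by simp; omega),
      List.getElem?_eq_none (by simp; omega)]

-- the grid after each of A's five passes ----------------------------------------

def grid0 (w h_ : Int) : List (List Char) :=
  (PySem.List.pyRange 0 h_ 1).map (fun _ => List.replicate w.toNat ' ')
def grid1 (w h_ : Int) : List (List Char) :=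
  (PySem.List.pyRange 1 (w - 1) 1).foldl (fun s j => setCell s 0 j '-') (grid0 w h_)
def grid2 (w h_ : Int) : List (List Char) :=
  (PySem.List.pyRange 1 (PySem.Int.floordiv h_ 2) 1).foldl
    (fun s i => setCell (setCell s i 0 '|') i (w - 1) '|') (grid1 w h_)
def grid3 (w h_ : Int) : List (List Char) :=
  (PySem.List.pyRange 1 (w - 1) 1).foldl
    (fun s j => setCell s (PySem.Int.floordiv h_ 2) j '-') (grid2 w h_)
def grid4 (w h_ : Int) : List (List Char) :=
  (PySem.List.pyRange (PySem.Int.floordiv h_ 2 + 1) (h_ - 1) 1).foldl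
    (fun s i => setCell s i (w - 1) '|') (grid3 w h_)
def grid5 (w h_ : Int) : List (List Char) :=
  (PySem.List.pyRange 1 (w - 1) 1).foldl (fun s j => setCell s (h_ - 1) j '-') (grid4 w h_)

theorem nine_eq_grid5 (w h_ : Int) : nine w h_ = (grid5 w h_).map String.ofList := rfl

theorem length_grid0 (w h_ : Int) : (grid0 w h_).length = h_.toNat := by
  simp [grid0, PySem.List.length_pyRange_one]

theorem length_grid1 (w h_ : Int) : (grid1 w h_).length = h_.toNat := by
  unfold grid1; rw [foldl_len_pres _ (fun s b => length_setCell s 0 b '-'), length_grid0]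

theorem length_grid2 (w h_ : Int) : (grid2 w h_).length = h_.toNat := by
  unfold grid2; rw [foldl_len_pres _ (fun s b => by
    rw [length_setCell, length_setCell]), length_grid1]

theorem length_grid3 (w h_ : Int) : (grid3 w h_).length = h_.toNat := by
  unfold grid3; rw [foldl_len_pres _ (fun s b => length_setCell s _ b '-'), length_grid2]

theorem length_grid4 (w h_ : Int) : (grid4 w h_).length = h_.toNat := by
  unfold grid4; rw [foldl_len_pres _ (fun s b => length_setCell s b _ '|'), length_grid3]

theorem length_grid5 (w h_ : Int) : (grid5 w h_).length = h_.toNat := by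
  unfold grid5; rw [foldl_len_pres _ (fun s b => length_setCell s _ b '-'), length_grid4]

-- main -------------------------------------------------------------------------

theorem nine_eq_alt (w h_ : Int) (pre : Pre_nine w h_) : nine w h_ = nine_alt w h_ := by
  obtain ⟨pre1, pre2⟩ := pre
  by_cases hh : 1 ≤ h_
  case neg =>
    -- h ≤ 0: the grid is empty, every pass leaves it empty, and B emits no rows
    have h0 : PySem.List.pyRange 0 h_ 1 = [] := PySem.List.pyRange_one_eq_nil (by omega)
    have e0 : grid0 w h_ = [] := by unfold grid0; rw [h0]; rfl
    have e5 : grid5 w h_ = [] := by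
      unfold grid5 grid4 grid3 grid2 grid1
      rw [e0,
        foldl_keep_nil _ (fun b => setCell_nil 0 b '-'),
        foldl_keep_nil _ (fun b => by rw [setCell_nil, setCell_nil]),
        foldl_keep_nil _ (fun b => setCell_nil _ b '-'),
        foldl_keep_nil _ (fun b => setCell_nil b _ '|'),
        foldl_keep_nil _ (fun b => setCell_nil _ b '-')]
    rw [nine_eq_grid5, e5]
    simp only [nine_alt]
    rw [h0, List.map_nil, List.map_nil]
  case pos =>
    have hm : PySem.Int.floordiv h_ 2 = h_ / 2 := PySem.Int.floordiv_eq_ediv_of_pos (by norm_num)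
    have hfd0 : 0 ≤ PySem.Int.floordiv h_ 2 := by omega
    have hfdlt : PySem.Int.floordiv h_ 2 < h_ := by omega
    -- pass 1: top bar
    have hc1 : grid1 w h_ = (grid0 w h_).set 0
        (Jfold w ((grid0 w h_)[0]'(by rw [length_grid0]; omega))) :=
      gridRowFold '-' 0 le_rfl _ (grid0 w h_) (by rw [length_grid0]; omega)
    have Hstep1 : ∀ (k : Nat), k < h_.toNat → (grid1 w h_)[k]? =
        ((grid0 w h_)[k]?).map (fun r => if k = 0 then Jfold w r else r) := by
      intro k hk
      have hk0 : k < (grid0 w h_).length := by rw [length_grid0]; exact hk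
      rw [hc1, List.getElem?_set, List.getElem?_eq_getElem hk0, Option.map_some]
      by_cases hc : k = 0
      · subst hc
        rw [if_pos rfl, if_pos rfl, if_pos (by rw [length_grid0]; omega)]
      · rw [if_neg (by omega), if_neg hc]
    -- pass 2: the two-sided rows 1 .. h//2-1
    have Hstep2 : ∀ (k : Nat), k < h_.toNat → (grid2 w h_)[k]? =
        ((grid1 w h_)[k]?).map
          (fun r => if 1 ≤ (k : Int) ∧ (k : Int) < PySem.Int.floordiv h_ 2 then g2row w r else r) := by
      intro k hk
      have hk1 : k < (grid1 w h_).length := by rw [length_grid1]; exact hk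
      have hchar := foldSet_getElem? (g2row w)
        (fun s i => setCell (setCell s i 0 '|') i (w - 1) '|')
        (fun s i hi hil => setCell2_eq w s i hi hil)
        (fun s b => by rw [length_setCell, length_setCell])
        (PySem.List.pyRange 1 (PySem.Int.floordiv h_ 2) 1)
        (PySem.List.pairwise_lt_pyRange_one _ _)
        (fun i hi => by have := (PySem.List.mem_pyRange_one).mp hi; omega)
        (grid1 w h_)
        (fun i hi => by
          have := (PySem.List.mem_pyRange_one).mp hi
          rw [length_grid1]; omega)
        k hk1
      unfold grid2
      rw [hchar, List.getElem?_eq_getElem hk1, Option.map_some]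
      simp only [PySem.List.mem_pyRange_one]
    -- pass 3: middle bar
    have hc3 : grid3 w h_ = (grid2 w h_).set (PySem.Int.floordiv h_ 2).toNat
        (Jfold w ((grid2 w h_)[(PySem.Int.floordiv h_ 2).toNat]'(by rw [length_grid2]; omega))) :=
      gridRowFold '-' (PySem.Int.floordiv h_ 2) hfd0 _ (grid2 w h_) (by rw [length_grid2]; omega)
    have Hstep3 : ∀ (k : Nat), k < h_.toNat → (grid3 w h_)[k]? =
        ((grid2 w h_)[k]?).map
          (fun r => if (PySem.Int.floordiv h_ 2).toNat = k then Jfold w r else r) := by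
      intro k hk
      have hk2 : k < (grid2 w h_).length := by rw [length_grid2]; exact hk
      rw [hc3, List.getElem?_set, List.getElem?_eq_getElem hk2, Option.map_some]
      by_cases hc : (PySem.Int.floordiv h_ 2).toNat = k
      · subst hc
        rw [if_pos rfl, if_pos rfl, if_pos (by rw [length_grid2]; omega)]
      · rw [if_neg hc, if_neg hc]
    -- pass 4: the right-only rows h//2+1 .. h-2
    have Hstep4 : ∀ (k : Nat), k < h_.toNat → (grid4 w h_)[k]? =
        ((grid3 w h_)[k]?).map
          (fun r => if PySem.Int.floordiv h_ 2 + 1 ≤ (k : Int) ∧ (k : Int) < h_ - 1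
            then g4row w r else r) := by
      intro k hk
      have hk3 : k < (grid3 w h_).length := by rw [length_grid3]; exact hk
      have hchar := foldSet_getElem? (g4row w)
        (fun s i => setCell s i (w - 1) '|')
        (fun s i hi hil => setCell_eq_set s i (w - 1) '|' hi hil)
        (fun s b => length_setCell s b _ '|')
        (PySem.List.pyRange (PySem.Int.floordiv h_ 2 + 1) (h_ - 1) 1)
        (PySem.List.pairwise_lt_pyRange_one _ _)
        (fun i hi => by have := (PySem.List.mem_pyRange_one).mp hi; omega)
        (grid3 w h_)
        (fun i hi => by
          have := (PySem.List.mem_pyRange_one).mp hi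
          rw [length_grid3]; omega)
        k hk3
      unfold grid4
      rw [hchar, List.getElem?_eq_getElem hk3, Option.map_some]
      simp only [PySem.List.mem_pyRange_one]
    -- pass 5: bottom bar
    have hc5 : grid5 w h_ = (grid4 w h_).set (h_ - 1).toNat
        (Jfold w ((grid4 w h_)[(h_ - 1).toNat]'(by rw [length_grid4]; omega))) :=
      gridRowFold '-' (h_ - 1) (by omega) _ (grid4 w h_) (by rw [length_grid4]; omega)
    have Hstep5 : ∀ (k : Nat), k < h_.toNat → (grid5 w h_)[k]? =
        ((grid4 w h_)[k]?).map
          (fun r => if (h_ - 1).toNat = k then Jfold w r else r) := by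
      intro k hk
      have hk4 : k < (grid4 w h_).length := by rw [length_grid4]; exact hk
      rw [hc5, List.getElem?_set, List.getElem?_eq_getElem hk4, Option.map_some]
      by_cases hc : (h_ - 1).toNat = k
      · subst hc
        rw [if_pos rfl, if_pos rfl, if_pos (by rw [length_grid4]; omega)]
      · rw [if_neg hc, if_neg hc]
    have H0 : ∀ (k : Nat), k < h_.toNat → (grid0 w h_)[k]? = some (eRow w) := by
      intro k hk
      unfold grid0
      rw [List.getElem?_map, PySem.List.getElem?_pyRange_one,
        if_pos (show k < (h_ - 0).toNat by omega), Option.map_some]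
      rfl
    have Hall : ∀ (k : Nat), k < h_.toNat → (grid5 w h_)[k]? = some
        ((fun r => if (h_ - 1).toNat = k then Jfold w r else r)
          ((fun r => if PySem.Int.floordiv h_ 2 + 1 ≤ (k : Int) ∧ (k : Int) < h_ - 1
              then g4row w r else r)
            ((fun r => if (PySem.Int.floordiv h_ 2).toNat = k then Jfold w r else r)
              ((fun r => if 1 ≤ (k : Int) ∧ (k : Int) < PySem.Int.floordiv h_ 2
                  then g2row w r else r)
                ((fun r => if k = 0 then Jfold w r else r) (eRow w)))))) := by
      intro k hk
      rw [Hstep5 k hk, Hstep4 k hk, Hstep3 k hk, Hstep2 k hk, Hstep1 k hk, H0 k hk]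
      simp only [Option.map_some]
    -- assemble
    rw [nine_eq_grid5]
    simp only [nine_alt]
    apply List.ext_getElem?
    intro k
    by_cases hk : k < h_.toNat
    · rw [List.getElem?_map, List.getElem?_map, Hall k hk,
        PySem.List.getElem?_pyRange_one, if_pos (show k < (h_ - 0).toNat by omega),
        Option.map_some, Option.map_some, zero_add]
      beta_reduce
      -- fold B's three literal rows back into their named forms
      have hbar : (if 2 ≤ w then ' ' :: (List.replicate (w - 2).toNat '-' ++ [' '])
          else List.replicate w.toNat ' ') = barL w := rfl
      have hsid : (if 2 ≤ w then '|' :: (List.replicate (w - 2).toNat ' ' ++ ['|'])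
          else List.replicate w.toNat '|') = sidesL w := rfl
      have hrig : (if 1 ≤ w then List.replicate (w - 1).toNat ' ' ++ ['|'] else []) = rightL w := rfl
      rw [hbar, hsid, hrig]
      by_cases hk0 : (k : Int) = 0 <;>
        by_cases hkm : (k : Int) = PySem.Int.floordiv h_ 2 <;>
          by_cases hkl : (k : Int) = h_ - 1
      · -- h = 1: the single row receives all three bars
        rw [if_pos (show (h_ - 1).toNat = k by omega),
          if_neg (show ¬ (PySem.Int.floordiv h_ 2 + 1 ≤ (k : Int) ∧ (k : Int) < h_ - 1) by omega),
          if_pos (show (PySem.Int.floordiv h_ 2).toNat = k by omega),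
          if_neg (show ¬ (1 ≤ (k : Int) ∧ (k : Int) < PySem.Int.floordiv h_ 2) by omega),
          if_pos (show k = 0 by omega),
          if_pos (Or.inl hk0), J_e, J_barL, J_barL]
      · exact absurd (show (k : Int) = h_ - 1 by omega) hkl
      · exact absurd (show (k : Int) = PySem.Int.floordiv h_ 2 by omega) hkm
      · -- top bar row
        rw [if_neg (show ¬ (h_ - 1).toNat = k by omega),
          if_neg (show ¬ (PySem.Int.floordiv h_ 2 + 1 ≤ (k : Int) ∧ (k : Int) < h_ - 1) by omega),
          if_neg (show ¬ (PySem.Int.floordiv h_ 2).toNat = k by omega),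
          if_neg (show ¬ (1 ≤ (k : Int) ∧ (k : Int) < PySem.Int.floordiv h_ 2) by omega),
          if_pos (show k = 0 by omega),
          if_pos (Or.inl hk0), J_e]
      · -- h = 2: middle and bottom bar coincide
        rw [if_pos (show (h_ - 1).toNat = k by omega),
          if_neg (show ¬ (PySem.Int.floordiv h_ 2 + 1 ≤ (k : Int) ∧ (k : Int) < h_ - 1) by omega),
          if_pos (show (PySem.Int.floordiv h_ 2).toNat = k by omega),
          if_neg (show ¬ (1 ≤ (k : Int) ∧ (k : Int) < PySem.Int.floordiv h_ 2) by omega),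
          if_neg (show ¬ k = 0 by omega),
          if_pos (Or.inr (Or.inl hkm)), J_e, J_barL]
      · -- middle bar row
        rw [if_neg (show ¬ (h_ - 1).toNat = k by omega),
          if_neg (show ¬ (PySem.Int.floordiv h_ 2 + 1 ≤ (k : Int) ∧ (k : Int) < h_ - 1) by omega),
          if_pos (show (PySem.Int.floordiv h_ 2).toNat = k by omega),
          if_neg (show ¬ (1 ≤ (k : Int) ∧ (k : Int) < PySem.Int.floordiv h_ 2) by omega),
          if_neg (show ¬ k = 0 by omega),
          if_pos (Or.inr (Or.inl hkm)), J_e]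
      · -- bottom bar row
        rw [if_pos (show (h_ - 1).toNat = k by omega),
          if_neg (show ¬ (PySem.Int.floordiv h_ 2 + 1 ≤ (k : Int) ∧ (k : Int) < h_ - 1) by omega),
          if_neg (show ¬ (PySem.Int.floordiv h_ 2).toNat = k by omega),
          if_neg (show ¬ (1 ≤ (k : Int) ∧ (k : Int) < PySem.Int.floordiv h_ 2) by omega),
          if_neg (show ¬ k = 0 by omega),
          if_pos (Or.inr (Or.inr hkl)), J_e]
      · by_cases hks : (k : Int) < PySem.Int.floordiv h_ 2
        · -- a two-sided row: here h ≥ 4, hence w ≥ 1 by Pre_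
          have hw1 : 1 ≤ w := by
            by_contra hw
            have := pre2 (by omega)
            omega
          rw [if_neg (show ¬ (h_ - 1).toNat = k by omega),
            if_neg (show ¬ (PySem.Int.floordiv h_ 2 + 1 ≤ (k : Int) ∧ (k : Int) < h_ - 1) by omega),
            if_neg (show ¬ (PySem.Int.floordiv h_ 2).toNat = k by omega),
            if_pos (show 1 ≤ (k : Int) ∧ (k : Int) < PySem.Int.floordiv h_ 2 by omega),
            if_neg (show ¬ k = 0 by omega),
            if_neg (show ¬ ((k : Int) = 0 ∨ (k : Int) = PySem.Int.floordiv h_ 2 ∨ (k : Int) = h_ - 1) by omega),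
            if_pos hks, g2_e w hw1]
        · -- a right-only row: here h ≥ 5, hence w ≥ 1 by Pre_
          have hw1 : 1 ≤ w := by
            by_contra hw
            have := pre2 (by omega)
            omega
          rw [if_neg (show ¬ (h_ - 1).toNat = k by omega),
            if_pos (show PySem.Int.floordiv h_ 2 + 1 ≤ (k : Int) ∧ (k : Int) < h_ - 1 by omega),
            if_neg (show ¬ (PySem.Int.floordiv h_ 2).toNat = k by omega),
            if_neg (show ¬ (1 ≤ (k : Int) ∧ (k : Int) < PySem.Int.floordiv h_ 2) by omega),
            if_neg (show ¬ k = 0 by omega),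
            if_neg (show ¬ ((k : Int) = 0 ∨ (k : Int) = PySem.Int.floordiv h_ 2 ∨ (k : Int) = h_ - 1) by omega),
            if_neg hks, g4_e w hw1]
    · rw [List.getElem?_eq_none (by rw [List.length_map, length_grid5]; omega),
        List.getElem?_eq_none (by
          rw [List.length_map, PySem.List.length_pyRange_one]; omega)]

-- ===== VERDICT (by name: the statement is the Claim_ definition above) =====
theorem nine_spec : Claim_equal_nine := by
  intro w h_ _ pre
  unfold Spec_nine
  exact nine_eq_alt w h_ pre
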